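-- pv_equiv track=rewrite | github.com/rickyurvinaunab/IntroProgra-2025-1 | clases/Clase10_funciones/encontrar_segundo_apellido.py | encontrar_segundo_apellido
-- ===== SOURCE A (Python) =====
-- def encontrar_segundo_apellido(nombre):
--     apellido = ""
--     contador = 0
--     for caracter in nombre:
--         if caracter == " ":
--             contador += 1
--             if contador == 2:
--                 break
--         elif contador == 1:
--             apellido += caracter
--     return apellido
-- ===== SOURCE B (Python) =====
-- def encontrar_segundo_apellido(nombre):
--     partes = nombre.split(" ")
--     return partes[1] if len(partes) >= 2 else ""
-- ===== Notes on version B (the rewrite author's own statement) =====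
-- stated objective: idiomatic
-- what changed: Replaced the character-by-character loop with a space counter by one single-space str.split producing the token list, then indexing its second element under a length guard.
import Mathlib
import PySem

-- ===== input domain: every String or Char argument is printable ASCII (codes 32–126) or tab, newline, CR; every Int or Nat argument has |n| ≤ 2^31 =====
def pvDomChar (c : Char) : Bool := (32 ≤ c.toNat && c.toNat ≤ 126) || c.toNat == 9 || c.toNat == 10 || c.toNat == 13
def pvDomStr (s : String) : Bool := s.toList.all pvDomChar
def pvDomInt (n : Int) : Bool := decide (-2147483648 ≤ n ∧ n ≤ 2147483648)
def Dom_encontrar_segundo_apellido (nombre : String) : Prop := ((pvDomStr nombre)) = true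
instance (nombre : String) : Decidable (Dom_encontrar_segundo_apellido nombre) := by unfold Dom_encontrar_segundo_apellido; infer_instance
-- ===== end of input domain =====

-- B replaces A's character-by-character loop with a space counter by a single split(" ") plus
-- indexing the second token with a length guard (idiomatic; a timing run measured B faster by a constant factor).

-- ===== PORT A =====
-- the for-loop of A: state (apellido, contador); the 'break' becomes returning apellido
def pvAgo : List Char → String → Int → String
  | [], ap, _ => ap
  | c :: rest, ap, cont =>
    if c = ' ' then
      if cont + 1 = 2 then ap else pvAgo rest ap (cont + 1)
    else if cont = 1 then pvAgo rest (ap.push c) cont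
    else pvAgo rest ap cont

def encontrar_segundo_apellido (nombre : String) : String :=
  pvAgo nombre.toList "" 0

-- ===== PORT B =====
def encontrar_segundo_apellido_alt (nombre : String) : String :=
  let partes := (PySem.Str.split? nombre " ").getD []   -- nombre.split(" "); sep ≠ "" so never none
  if 2 ≤ partes.length then partes.getD 1 "" else ""    -- partes[1] if len(partes) >= 2 else ""

-- ===== PRECONDITION & SPEC =====
def Spec_encontrar_segundo_apellido (nombre : String) (out : String) : Prop := out = encontrar_segundo_apellido_alt nombre
instance (nombre : String) (out : String) : Decidable (Spec_encontrar_segundo_apellido nombre out) := by unfold Spec_encontrar_segundo_apellido; infer_instance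

-- ===== CLAIM (what is proved, stated in full; the proofs are below) =====
def Claim_equal_encontrar_segundo_apellido : Prop := ∀ (nombre : String), Dom_encontrar_segundo_apellido nombre → Spec_encontrar_segundo_apellido nombre (encontrar_segundo_apellido nombre)

-- ===== LEMMAS AND PROOFS =====

-- pure recursive description of splitting a char list on single spaces
def pvWords (l : List Char) : List (List Char) :=
  match h : l.dropWhile (· ≠ ' ') with
  | [] => [l.takeWhile (· ≠ ' ')]
  | _ :: rest => l.takeWhile (· ≠ ' ') :: pvWords rest
termination_by l.length
decreasing_by
  have h1 := List.length_dropWhile_le (· ≠ ' ') l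
  rw [h] at h1; simp at h1; omega

theorem pvWords_head (l : List Char) : ∃ ws, pvWords l = l.takeWhile (· ≠ ' ') :: ws := by
  rw [pvWords]
  split <;> exact ⟨_, rfl⟩

theorem pvWords_headI_tail (l : List Char) :
    (pvWords l).headI :: (pvWords l).tail = pvWords l := by
  obtain ⟨ws, hws⟩ := pvWords_head l
  rw [hws]; rfl

theorem pvWords_nospace (l : List Char) (h : l.dropWhile (· ≠ ' ') = []) :
    pvWords l = [l.takeWhile (· ≠ ' ')] := by
  rw [pvWords]; split
  · rfl
  · rename_i x rest h'; rw [h] at h'; cases h'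

theorem pvWords_space (l : List Char) (x : Char) (rest : List Char)
    (h : l.dropWhile (· ≠ ' ') = x :: rest) :
    pvWords l = l.takeWhile (· ≠ ' ') :: pvWords rest := by
  rw [pvWords]; split
  · rename_i h'; rw [h] at h'; cases h'
  · rename_i y r h'; rw [h] at h'; cases h'; rfl

theorem pvDropWhile_cons_ne (c : Char) (rest : List Char) (hc : ¬ c = ' ') :
    (c :: rest).dropWhile (· ≠ ' ') = rest.dropWhile (· ≠ ' ') := by
  rw [List.dropWhile_cons, if_pos (by simp [hc])]

theorem pvTakeWhile_cons_ne (c : Char) (rest : List Char) (hc : ¬ c = ' ') :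
    (c :: rest).takeWhile (· ≠ ' ') = c :: rest.takeWhile (· ≠ ' ') := by
  rw [List.takeWhile_cons, if_pos (by simp [hc])]

-- the fuel-driven splitter equals pvWords (sep = [' '])
theorem pvGo_eq (fuel : Nat) : ∀ (l cur : List Char) (acc : List (List Char)),
    l.length < fuel →
    PySem.Chars.splitOn.go [' '] fuel l cur acc =
      acc.reverse ++ (cur.reverse ++ (pvWords l).headI) :: (pvWords l).tail := by
  induction fuel with
  | zero => intro l cur acc h; omega
  | succ f ih =>
    intro l cur acc h
    cases l with
    | nil =>
      simp [PySem.Chars.splitOn.go, pvWords_nospace [] (by simp)]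
    | cons c rest =>
      by_cases hc : c = ' '
      · subst hc
        have hstep : PySem.Chars.splitOn.go [' '] (f + 1) (' ' :: rest) cur acc =
            PySem.Chars.splitOn.go [' '] f rest [] (cur.reverse :: acc) := by
          simp [PySem.Chars.splitOn.go, List.isPrefixOf]
        rw [hstep, ih rest [] (cur.reverse :: acc) (by simp at h; omega)]
        rw [pvWords_space (' ' :: rest) ' ' rest (by simp)]
        simp [pvWords_headI_tail]
      · have hstep : PySem.Chars.splitOn.go [' '] (f + 1) (c :: rest) cur acc =
            PySem.Chars.splitOn.go [' '] f rest (c :: cur) acc := by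
          simp [PySem.Chars.splitOn.go, List.isPrefixOf]
          intro e; exact absurd e.symm hc
        rw [hstep, ih rest (c :: cur) acc (by simp at h; omega)]
        obtain ⟨ws, hws⟩ := pvWords_head rest
        have hcr : pvWords (c :: rest) = (c :: rest.takeWhile (· ≠ ' ')) :: ws := by
          cases hd : rest.dropWhile (· ≠ ' ') with
          | nil =>
            rw [pvWords_nospace (c :: rest) (by rw [pvDropWhile_cons_ne c rest hc]; exact hd)]
            rw [pvWords_nospace rest hd] at hws
            cases hws
            rw [pvTakeWhile_cons_ne c rest hc]
          | cons x r =>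
            rw [pvWords_space (c :: rest) x r (by rw [pvDropWhile_cons_ne c rest hc]; exact hd)]
            rw [pvWords_space rest x r hd] at hws
            cases hws
            rw [pvTakeWhile_cons_ne c rest hc]
        rw [hws, hcr]
        simp

theorem splitOn_eq_pvWords (l : List Char) : PySem.Chars.splitOn l [' '] = pvWords l := by
  have := pvGo_eq (l.length + 1) l [] [] (by omega)
  rw [PySem.Chars.splitOn, this]
  obtain ⟨ws, hws⟩ := pvWords_head l
  rw [hws]; simp

-- A's loop starting in state contador = 1 appends the chars up to the next space
theorem pvAgo_one (l : List Char) : ∀ ap : String,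
    pvAgo l ap 1 = String.ofList (ap.toList ++ l.takeWhile (· ≠ ' ')) := by
  induction l with
  | nil => intro ap; simp [pvAgo]
  | cons c rest ih =>
    intro ap
    by_cases hc : c = ' '
    · subst hc
      simp [pvAgo]
    · rw [show pvAgo (c :: rest) ap 1 = pvAgo rest (ap.push c) 1 by simp [pvAgo, hc]]
      rw [ih (ap.push c), pvTakeWhile_cons_ne c rest hc]
      apply congrArg
      simp

-- A's loop in state contador = 0: skip to the first space (if none, return ap unchanged)
theorem pvAgo_zero_nospace (l : List Char) (ap : String) (h : l.dropWhile (· ≠ ' ') = []) :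
    pvAgo l ap 0 = ap := by
  induction l with
  | nil => simp [pvAgo]
  | cons c rest ih =>
    by_cases hc : c = ' '
    · subst hc
      rw [List.dropWhile_cons, if_neg (by simp)] at h
      cases h
    · rw [pvDropWhile_cons_ne c rest hc] at h
      rw [show pvAgo (c :: rest) ap 0 = pvAgo rest ap 0 by simp [pvAgo, hc]]
      exact ih h

theorem pvAgo_zero_space (l : List Char) (ap : String) (x : Char) (rest : List Char)
    (h : l.dropWhile (· ≠ ' ') = x :: rest) :
    pvAgo l ap 0 = pvAgo rest ap 1 := by
  induction l with
  | nil => cases h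
  | cons c t ih =>
    by_cases hc : c = ' '
    · subst hc
      rw [List.dropWhile_cons, if_neg (by simp)] at h
      cases h
      simp [pvAgo]
    · rw [pvDropWhile_cons_ne c t hc] at h
      rw [show pvAgo (c :: t) ap 0 = pvAgo t ap 0 by simp [pvAgo, hc]]
      exact ih h

-- ===== VERDICT (by name: the statement is the Claim_ definition above) =====
theorem encontrar_segundo_apellido_spec : Claim_equal_encontrar_segundo_apellido := by
  intro nombre _
  show encontrar_segundo_apellido nombre = encontrar_segundo_apellido_alt nombre
  unfold encontrar_segundo_apellido encontrar_segundo_apellido_alt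
  have hsplit : PySem.Str.split? nombre " " = some ((pvWords nombre.toList).map String.ofList) := by
    rw [PySem.Str.split?]
    have h1 : PySem.Chars.split? nombre.toList " ".toList = some (pvWords nombre.toList) := by
      rw [show (" " : String).toList = [' '] from rfl, PySem.Chars.split?,
        if_neg (by simp), splitOn_eq_pvWords]
    rw [h1]; rfl
  rw [hsplit]
  cases h : nombre.toList.dropWhile (· ≠ ' ') with
  | nil =>
    rw [pvAgo_zero_nospace _ _ h, pvWords_nospace _ h]
    simp
  | cons x rest =>
    rw [pvAgo_zero_space _ _ x rest h, pvWords_space _ x rest h, pvAgo_one]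
    obtain ⟨ws, hws⟩ := pvWords_head rest
    rw [hws]
    simp
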